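-- pv_equiv track=rewrite | github.com/szkruk/Aoc2023 | Day 1/main.py | return_first_match
-- ===== SOURCE A (Python) =====
-- from typing import Tuple
--
-- mapping:dict = {
--     "one": "o1ne",
--     "two": "tw2o",
--     "three":"thre3e",
--     "four": "f4our",
--     "five": "f5ive",
--     "six": "s6ix",
--     "seven": "s7even",
--     "eight": "ei8ht",
--     "nine": "ni9ne"
-- }
--
-- def return_first_match(word:str)-> Tuple[str,str] or None:
--     smallest_index:int or None = None
--     first_match:str or None = None
--     for letters in mapping.keys():
--         try:
--             index = word.index(letters)
--             if(smallest_index==None):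
--                 smallest_index = index
--                 first_match = letters
--                 continue
--             if index < smallest_index:
--                 smallest_index = index
--                 first_match = letters
--         except:
--             pass
--     return (first_match, mapping.get(first_match)) if first_match else None
-- ===== SOURCE B (Python) =====
-- mapping: dict = {
--     "one": "o1ne",
--     "two": "tw2o",
--     "three": "thre3e",
--     "four": "f4our",
--     "five": "f5ive",
--     "six": "s6ix",
--     "seven": "s7even",
--     "eight": "ei8ht",
--     "nine": "ni9ne"
-- }
--
--
-- def return_first_match(word: str):
--     # Single left-to-right scan: stop at the first position where some
--     # digit word starts.  No digit word is a prefix of another, so the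
--     # match found first is exactly the key with the smallest index.
--     for i in range(len(word)):
--         for key, val in mapping.items():
--             if word.startswith(key, i):
--                 return (key, val)
--     return None
-- ===== Notes on version B (the rewrite author's own statement) =====
-- stated objective: idiomatic
-- what changed: Instead of calling word.index for each of the nine keys and tracking the minimal index with tie logic, B scans the string once left to right and returns at the first position where any key starts (str.startswith with an offset); since no key is a prefix of another, the first hit is exactly A's minimal-index winner.
import Mathlib
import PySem

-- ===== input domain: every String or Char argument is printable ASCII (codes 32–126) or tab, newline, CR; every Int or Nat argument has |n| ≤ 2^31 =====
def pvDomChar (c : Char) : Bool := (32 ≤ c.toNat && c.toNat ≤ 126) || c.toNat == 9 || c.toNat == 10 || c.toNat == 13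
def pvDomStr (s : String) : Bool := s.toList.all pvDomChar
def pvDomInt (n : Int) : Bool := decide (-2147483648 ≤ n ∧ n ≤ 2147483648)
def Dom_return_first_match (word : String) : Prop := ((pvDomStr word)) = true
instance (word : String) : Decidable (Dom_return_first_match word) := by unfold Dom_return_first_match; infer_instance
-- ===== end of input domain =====

-- B replaces A's nine word.index scans (argmin of the indices) by one left-to-right scan of the
-- string that returns at the first position where any digit word starts (idiomatic single pass;
-- no digit word is a prefix of another, so the first hit is A's minimal-index winner).

-- ===== PORT A =====
-- the module-level dict 'mapping'
def pvMapping : PySem.Dict String String :=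
  PySem.Dict.mk
  [("one", "o1ne"), ("two", "tw2o"), ("three", "thre3e"), ("four", "f4our"), ("five", "f5ive"),
   ("six", "s6ix"), ("seven", "s7even"), ("eight", "ei8ht"), ("nine", "ni9ne")]

-- loop body of A: 'index = word.index(letters)' raises ValueError when absent, which the bare
-- 'except: pass' swallows; PySem.Str.find's -1 marks exactly that path.
def pvStepA (word : String) (s : Option Int × Option String) (letters : String) :
    Option Int × Option String :=
  let index := PySem.Str.find word letters
  if index = -1 then s          -- except: pass
  else
    match s.1 with
    | none => (some index, some letters)
    | some smallest_index =>
        if index < smallest_index then (some index, some letters) else s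

def return_first_match (word : String) : Option (String × String) :=
  match ((PySem.Dict.keys pvMapping).foldl (pvStepA word) (none, none)).2 with
  | some first_match =>
      -- first_match, when set, is always a key of mapping, so mapping.get(first_match)
      -- returns its value; the .getD "" default is never taken.
      some (first_match, (PySem.Dict.get? pvMapping first_match).getD "")
  | none => none

-- ===== PORT B =====
-- 'for i in range(len(word)) : for key, val in mapping.items(): if word.startswith(key, i): return (key, val)'
-- as recursion over the suffixes of word (position i ↦ suffix word[i:]).
def pvScan : List Char → Option (String × String)
  | [] => none
  | c :: rest =>
    match pvMapping.items.find? (fun kv => PySem.Chars.startswith (c :: rest) kv.1.toList) with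
    | some kv => some kv
    | none => pvScan rest

def return_first_match_alt (word : String) : Option (String × String) :=
  pvScan word.toList

-- ===== PRECONDITION & SPEC =====
def Spec_return_first_match (word : String) (out : Option (String × String)) : Prop := out = return_first_match_alt word
instance (word : String) (out : Option (String × String)) : Decidable (Spec_return_first_match word out) := by unfold Spec_return_first_match; infer_instance

-- ===== CLAIM (what is proved, stated in full; the proofs are below) =====
def Claim_equal_return_first_match : Prop := ∀ (word : String), Dom_return_first_match word → Spec_return_first_match word (return_first_match word)

-- ===== LEMMAS AND PROOFS =====

-- A's loop body over a character list (PySem.Str.find unfolds to PySem.Chars.find on toList)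
def pvStepAC (l : List Char) (s : Option Int × Option String) (letters : String) :
    Option Int × Option String :=
  let index := PySem.Chars.find l letters.toList
  if index = -1 then s
  else
    match s.1 with
    | none => (some index, some letters)
    | some smallest_index =>
        if index < smallest_index then (some index, some letters) else s

def pvAChars (l : List Char) : Option (String × String) :=
  match ((PySem.Dict.keys pvMapping).foldl (pvStepAC l) (none, none)).2 with
  | some first_match => some (first_match, (PySem.Dict.get? pvMapping first_match).getD "")
  | none => none

theorem pvA_eq_chars (word : String) : return_first_match word = pvAChars word.toList := by
  have h : pvStepA word = pvStepAC word.toList := by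
    funext s letters
    simp [pvStepA, pvStepAC, PySem.Str.find_eq]
  simp [return_first_match, pvAChars, h]

-- structural facts about PySem.Chars.find (via its auxiliary go)
theorem pvGo_nil (sub : List Char) (k : Nat) :
    PySem.Chars.find.go sub [] k = if sub.isEmpty then (k : Int) else -1 := rfl

theorem pvGo_cons (sub : List Char) (c : Char) (t : List Char) (k : Nat) :
    PySem.Chars.find.go sub (c :: t) k =
      if sub.isPrefixOf (c :: t) then (k : Int) else PySem.Chars.find.go sub t (k + 1) := rfl

theorem pvGo_nonneg (sub : List Char) :
    ∀ (l : List Char) (k : Nat), PySem.Chars.find.go sub l k = -1 ∨ (k : Int) ≤ PySem.Chars.find.go sub l k := by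
  intro l
  induction l with
  | nil => intro k; rw [pvGo_nil]; split_ifs <;> simp
  | cons c t ih =>
      intro k; rw [pvGo_cons]
      split_ifs with h
      · right; simp
      · rcases ih (k + 1) with h1 | h1
        · left; exact h1
        · right
          have : (k : Int) ≤ ((k + 1 : Nat) : Int) := by push_cast; omega
          exact this.trans h1

theorem pvGo_shift (sub : List Char) :
    ∀ (l : List Char) (k : Nat),
      PySem.Chars.find.go sub l k =
        if PySem.Chars.find.go sub l 0 = -1 then -1 else PySem.Chars.find.go sub l 0 + k := by
  intro l
  induction l with
  | nil =>
      intro k; rw [pvGo_nil, pvGo_nil]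
      by_cases he : sub.isEmpty = true
      · rw [if_pos he, if_pos he]; norm_num
      · rw [if_neg he, if_neg he]; norm_num
  | cons c t ih =>
      intro k
      rw [pvGo_cons, pvGo_cons sub c t 0]
      by_cases h : sub.isPrefixOf (c :: t) = true
      · rw [if_pos h, if_pos h]; norm_num
      · rw [if_neg h, if_neg h, ih (k + 1), ih (0 + 1)]
        rcases pvGo_nonneg sub t 0 with h0 | h0
        · simp [h0]
        · have hne : PySem.Chars.find.go sub t 0 ≠ -1 := by omega
          rw [if_neg hne, if_neg hne]
          have hne1 : PySem.Chars.find.go sub t 0 + ((0 + 1 : Nat) : Int) ≠ -1 := by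
            push_cast; omega
          rw [if_neg hne1]
          push_cast; ring

theorem pvFind_nonneg (l sub : List Char) (h : PySem.Chars.find l sub ≠ -1) :
    0 ≤ PySem.Chars.find l sub := by
  have := pvGo_nonneg sub l 0
  unfold PySem.Chars.find at *
  rcases this with h1 | h1
  · exact absurd h1 h
  · simpa using h1

theorem pvFind_cons (c : Char) (rest sub : List Char) :
    PySem.Chars.find (c :: rest) sub =
      if sub <+: (c :: rest) then 0
      else if PySem.Chars.find rest sub = -1 then -1 else PySem.Chars.find rest sub + 1 := by
  unfold PySem.Chars.find
  rw [pvGo_cons]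
  by_cases hp : sub <+: (c :: rest)
  · have : sub.isPrefixOf (c :: rest) = true := List.isPrefixOf_iff_prefix.mpr hp
    simp [this, hp]
  · have : sub.isPrefixOf (c :: rest) = false := by
      rw [Bool.eq_false_iff]; intro hc; exact hp (List.isPrefixOf_iff_prefix.mp hc)
    rw [if_neg (by simp [this]), if_neg hp, pvGo_shift sub rest 1]
    split_ifs <;> simp

theorem pvFind_zero_prefix (c : Char) (rest sub : List Char)
    (h : PySem.Chars.find (c :: rest) sub = 0) : sub <+: (c :: rest) := by
  by_contra hp
  rw [pvFind_cons, if_neg hp] at h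
  by_cases h1 : PySem.Chars.find rest sub = -1
  · rw [if_pos h1] at h; exact absurd h (by norm_num)
  · rw [if_neg h1] at h
    have := pvFind_nonneg rest sub h1
    omega

theorem pvFind_prefix_zero (c : Char) (rest sub : List Char) (h : sub <+: (c :: rest)) :
    PySem.Chars.find (c :: rest) sub = 0 := by
  rw [pvFind_cons, if_pos h]

-- literal facts about the mapping, checked by computation
theorem pvKeys_eq : PySem.Dict.keys pvMapping = pvMapping.items.map Prod.fst := by decide

theorem pvMapping_get : ∀ kv ∈ pvMapping.items, (PySem.Dict.get? pvMapping kv.1).getD "" = kv.2 := by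
  decide

theorem pvKeys_prefix_eq :
    ∀ kv1 ∈ pvMapping.items, ∀ kv2 ∈ pvMapping.items, kv1.1.toList <+: kv2.1.toList → kv1 = kv2 := by
  decide

-- no two (distinct) keys can start at the same position
theorem pvMatch_unique (l : List Char) :
    ∀ kv1 ∈ pvMapping.items, ∀ kv2 ∈ pvMapping.items,
      kv1.1.toList <+: l → kv2.1.toList <+: l → kv1 = kv2 := by
  intro kv1 h1 kv2 h2 hp1 hp2
  rcases List.prefix_or_prefix_of_prefix hp1 hp2 with h | h
  · exact pvKeys_prefix_eq kv1 h1 kv2 h2 h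
  · exact (pvKeys_prefix_eq kv2 h2 kv1 h1 h).symm

-- once the accumulator's smallest_index is 0, A's loop never changes the state again
theorem pvFold_absorb (l : List Char) :
    ∀ (ks : List String) (s : Option Int × Option String), s.1 = some 0 →
      ks.foldl (pvStepAC l) s = s := by
  intro ks
  induction ks with
  | nil => intro s _; rfl
  | cons k ks ih =>
      intro s hs
      have hstep : pvStepAC l s k = s := by
        unfold pvStepAC
        by_cases hf : PySem.Chars.find l k.toList = -1
        · simp [hf]
        · have h0 := pvFind_nonneg l k.toList hf
          rcases s with ⟨s1, s2⟩
          simp at hs; subst hs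
          simp [hf]
          omega
      rw [List.foldl_cons, hstep, ih s hs]

-- the key with index 0 wins A's argmin loop
theorem pvFold_pick (l : List Char) (k0 : String) (hk0 : PySem.Chars.find l k0.toList = 0) :
    ∀ (ks : List String) (s : Option Int × Option String),
      (∀ k ∈ ks, PySem.Chars.find l k.toList = 0 → k = k0) →
      (∀ n, s.1 = some n → 0 < n) →
      k0 ∈ ks →
      (ks.foldl (pvStepAC l) s).2 = some k0 := by
  intro ks
  induction ks with
  | nil => intro s _ _ hmem; exact absurd hmem (List.not_mem_nil)
  | cons k ks ih =>
      intro s huniq hpos hmem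
      by_cases hk : k = k0
      · subst hk
        have hstep : pvStepAC l s k = (some 0, some k) := by
          unfold pvStepAC
          have hne : PySem.Chars.find l k.toList ≠ -1 := by rw [hk0]; norm_num
          rcases s with ⟨s1, s2⟩
          cases s1 with
          | none => simp [hk0]
          | some si =>
              have : 0 < si := hpos si rfl
              simp [hk0]
              omega
        rw [List.foldl_cons, hstep, pvFold_absorb l ks (some 0, some k) rfl]
      · have hkne : PySem.Chars.find l k.toList ≠ 0 := fun h =>
          hk (huniq k (List.mem_cons_self) h)
        have hmem' : k0 ∈ ks := by
          rcases List.mem_cons.mp hmem with h | h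
          · exact absurd h.symm hk
          · exact h
        have hpos' : ∀ n, (pvStepAC l s k).1 = some n → 0 < n := by
          intro n hn
          unfold pvStepAC at hn
          by_cases hf : PySem.Chars.find l k.toList = -1
          · simp [hf] at hn; exact hpos n hn
          · have h0 := pvFind_nonneg l k.toList hf
            rcases s with ⟨s1, s2⟩
            cases s1 with
            | none => simp [hf] at hn; omega
            | some si =>
                have hsi : 0 < si := hpos si rfl
                simp [hf] at hn
                split_ifs at hn with hlt
                · simp at hn; omega
                · simp at hn; omega
        rw [List.foldl_cons]
        exact ih (pvStepAC l s k)
          (fun k' hk' h => huniq k' (List.mem_cons_of_mem _ hk') h) hpos' hmem'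

-- when no key starts at position 0, A on c :: rest runs like A on rest with all indices shifted by 1
theorem pvFold_shift (c : Char) (rest : List Char) :
    ∀ (ks : List String) (s : Option Int × Option String),
      (∀ k ∈ ks, ¬ k.toList <+: (c :: rest)) →
      ks.foldl (pvStepAC (c :: rest)) (s.1.map (· + 1), s.2) =
        (((ks.foldl (pvStepAC rest) s).1).map (· + 1), (ks.foldl (pvStepAC rest) s).2) := by
  intro ks
  induction ks with
  | nil => intro s _; rfl
  | cons k ks ih =>
      intro s hnp
      have hknp : ¬ k.toList <+: (c :: rest) := hnp k (List.mem_cons_self)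
      have hstep : pvStepAC (c :: rest) (s.1.map (· + 1), s.2) k =
          ((pvStepAC rest s k).1.map (· + 1), (pvStepAC rest s k).2) := by
        unfold pvStepAC
        rw [pvFind_cons, if_neg hknp]
        by_cases hf : PySem.Chars.find rest k.toList = -1
        · simp [hf]
        · have h0 := pvFind_nonneg rest k.toList hf
          have hne : PySem.Chars.find rest k.toList + 1 ≠ -1 := by omega
          rcases s with ⟨s1, s2⟩
          cases s1 with
          | none => simp [hf, hne]
          | some si =>
              simp only [if_neg hf, if_neg hne, Option.map_some]
              have hiff : PySem.Chars.find rest k.toList + 1 < si + 1 ↔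
                  PySem.Chars.find rest k.toList < si := by omega
              by_cases hlt : PySem.Chars.find rest k.toList < si
              · simp [hlt, hiff.mpr hlt]
              · simp [hlt, hiff]
      rw [List.foldl_cons, List.foldl_cons, hstep,
        ih (pvStepAC rest s k) (fun k' hk' => hnp k' (List.mem_cons_of_mem _ hk'))]

theorem pvMain : ∀ (l : List Char), pvAChars l = pvScan l := by
  intro l
  induction l with
  | nil => decide
  | cons c rest ih =>
      unfold pvScan
      cases hfind : pvMapping.items.find?
          (fun kv => PySem.Chars.startswith (c :: rest) kv.1.toList) with
      | some kv0 =>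
          have hmem : kv0 ∈ pvMapping.items := List.mem_of_find?_eq_some hfind
          have hP := List.find?_some hfind
          simp only [] at hP
          have hpref : kv0.1.toList <+: (c :: rest) :=
            (PySem.Chars.startswith_iff _ _).mp hP
          have hk0 : PySem.Chars.find (c :: rest) kv0.1.toList = 0 :=
            pvFind_prefix_zero c rest _ hpref
          have huniq : ∀ k ∈ PySem.Dict.keys pvMapping,
              PySem.Chars.find (c :: rest) k.toList = 0 → k = kv0.1 := by
            intro k hk h0
            rw [pvKeys_eq] at hk
            rcases List.mem_map.mp hk with ⟨kv, hkv, rfl⟩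
            have hp := pvFind_zero_prefix c rest _ h0
            exact congrArg Prod.fst (pvMatch_unique (c :: rest) kv hkv kv0 hmem hp hpref)
          have hk0mem : kv0.1 ∈ PySem.Dict.keys pvMapping := by
            rw [pvKeys_eq]; exact List.mem_map.mpr ⟨kv0, hmem, rfl⟩
          have hsnd := pvFold_pick (c :: rest) kv0.1 hk0 (PySem.Dict.keys pvMapping)
            (none, none) huniq (by intro n h; simp at h) hk0mem
          unfold pvAChars
          rw [hsnd]
          simp [pvMapping_get kv0 hmem]
      | none =>
          have hnone : ∀ kv ∈ pvMapping.items,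
              ¬ PySem.Chars.startswith (c :: rest) kv.1.toList = true := by
            intro kv hkv
            exact List.find?_eq_none.mp hfind kv hkv
          have hnp : ∀ k ∈ PySem.Dict.keys pvMapping, ¬ k.toList <+: (c :: rest) := by
            intro k hk hp
            rw [pvKeys_eq] at hk
            rcases List.mem_map.mp hk with ⟨kv, hkv, rfl⟩
            exact hnone kv hkv ((PySem.Chars.startswith_iff _ _).mpr hp)
          have hshift := pvFold_shift c rest (PySem.Dict.keys pvMapping) (none, none) hnp
          unfold pvAChars
          have : ((none : Option Int).map (· + 1), (none : Option String)) = (none, none) := rfl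
          rw [← this, hshift]
          rw [← ih]
          rfl

-- ===== VERDICT (by name: the statement is the Claim_ definition above) =====
theorem return_first_match_spec : Claim_equal_return_first_match := by
  intro word _
  unfold Spec_return_first_match return_first_match_alt
  rw [pvA_eq_chars, pvMain]
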